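-- pv_equiv track=rewrite | github.com/hardaker/argparse-with-config | argparse_with_config/__init__.py | get_argument_name
-- ===== SOURCE A (Python) =====
-- def get_argument_name(args):
--     """Finds the argument to use for creating a variable name."""
--     # TODO(hardaker): pull this from a parent implementation
--
--     for arg in args:
--         if arg.startswith("--"):
--             arg = arg[2:].replace("-", "_")
--             return arg
--
--     # if no double args, use a single
--     for arg in args:
--         if arg.startswith("-"):
--             arg = arg[1:].replace("-", "_")
--             return arg
--
--     return None
-- ===== SOURCE B (Python) =====
-- def get_argument_name(args):
--     """Finds the argument to use for creating a variable name."""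
--     cands = [(0, a[2:]) if a.startswith("--") else (1, a[1:])
--              for a in args if a.startswith("-")]
--     if not cands:
--         return None
--     return min(cands, key=lambda t: t[0])[1].replace("-", "_")
-- ===== Notes on version B (the rewrite author's own statement) =====
-- stated objective: alternative
-- what changed: Instead of A's two sequential scans over args, B builds one candidate list of (priority, stripped-name) pairs in a single comprehension and takes the first minimum by priority (0 for '--', 1 for '-'), applying the '-'-to-'_' replacement once at the end; the single pass plus min avoids A's second full scan.
import Mathlib
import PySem

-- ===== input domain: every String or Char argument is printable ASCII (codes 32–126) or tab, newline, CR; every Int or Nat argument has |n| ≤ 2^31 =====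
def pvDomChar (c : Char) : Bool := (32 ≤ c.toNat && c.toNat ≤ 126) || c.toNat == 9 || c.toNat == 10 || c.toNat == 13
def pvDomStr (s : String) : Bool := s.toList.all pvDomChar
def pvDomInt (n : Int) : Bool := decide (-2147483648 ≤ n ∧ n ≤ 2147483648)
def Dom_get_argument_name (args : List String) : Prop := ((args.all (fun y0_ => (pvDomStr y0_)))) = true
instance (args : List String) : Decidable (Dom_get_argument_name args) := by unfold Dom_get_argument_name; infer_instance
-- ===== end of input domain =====

-- B replaces A's two sequential scans by building a (priority, name) candidate list
-- in one pass and taking the first minimum by priority; objective: alternative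
-- (a timing run measured B faster; asymptotics unchanged, both O(n)).

-- ===== PORT A =====
-- first loop of A: return the first '--' option, transformed
def gaLoop1 : List String → Option String
  | [] => none
  | arg :: rest =>
    if PySem.Str.startswith arg "--" then
      some (PySem.Str.replace (PySem.Str.slice arg (some 2) none) "-" "_")
    else gaLoop1 rest

-- second loop of A: return the first '-' option, transformed
def gaLoop2 : List String → Option String
  | [] => none
  | arg :: rest =>
    if PySem.Str.startswith arg "-" then
      some (PySem.Str.replace (PySem.Str.slice arg (some 1) none) "-" "_")
    else gaLoop2 rest

def get_argument_name (args : List String) : Option String :=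
  match gaLoop1 args with
  | some r => some r
  | none => gaLoop2 args

-- ===== PORT B =====
-- the candidate-list comprehension of Source B
def gaCands (args : List String) : List (Int × String) :=
  args.filterMap (fun a =>
    if PySem.Str.startswith a "-" then
      some (if PySem.Str.startswith a "--" then (0, PySem.Str.slice a (some 2) none)
            else (1, PySem.Str.slice a (some 1) none))
    else none)

def get_argument_name_alt (args : List String) : Option String :=
  match PySem.List.min? (gaCands args) (fun t => t.1) with
  | none => none
  | some t => some (PySem.Str.replace t.2 "-" "_")

-- ===== PRECONDITION & SPEC =====
def Spec_get_argument_name (args : List String) (out : Option String) : Prop := out = get_argument_name_alt args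
instance (args : List String) (out : Option String) : Decidable (Spec_get_argument_name args out) := by unfold Spec_get_argument_name; infer_instance

-- ===== CLAIM =====
def Claim_equal_get_argument_name : Prop := ∀ (args : List String), Dom_get_argument_name args → Spec_get_argument_name args (get_argument_name args)

-- ===== LEMMAS AND PROOFS =====
-- a char list starting with "--" also starts with "-"
theorem chars_dash_of_ddash {l : List Char}
    (h : PySem.Chars.startswith l ['-', '-'] = true) :
    PySem.Chars.startswith l ['-'] = true := by
  simp only [PySem.Chars.startswith, List.isPrefixOf_iff_prefix] at h ⊢
  exact List.IsPrefix.trans ⟨['-'], rfl⟩ h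

-- every candidate's priority is 0 or 1
theorem gaCands_keys {args : List String} {c : Int × String}
    (h : c ∈ gaCands args) : c.1 = 0 ∨ c.1 = 1 := by
  simp only [gaCands, List.mem_filterMap] at h
  obtain ⟨a, _, ha⟩ := h
  split at ha
  · split at ha <;> (cases ha; simp)
  · simp at ha

-- unfolding gaCands on a cons cell, per case
theorem gaCands_cons_ddash {a : String} (rest : List String)
    (h2 : PySem.Chars.startswith a.toList ['-', '-'] = true) :
    gaCands (a :: rest) = (0, PySem.Str.slice a (some 2) none) :: gaCands rest := by
  have h1 := chars_dash_of_ddash h2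
  simp only [gaCands, List.filterMap_cons]
  simp [PySem.Str.startswith, h1, h2]

theorem gaCands_cons_dash {a : String} (rest : List String)
    (h2 : PySem.Chars.startswith a.toList ['-', '-'] = false)
    (h1 : PySem.Chars.startswith a.toList ['-'] = true) :
    gaCands (a :: rest) = (1, PySem.Str.slice a (some 1) none) :: gaCands rest := by
  simp only [gaCands, List.filterMap_cons]
  simp [PySem.Str.startswith, h1, h2]

theorem gaCands_cons_none {a : String} (rest : List String)
    (h1 : PySem.Chars.startswith a.toList ['-'] = false) :
    gaCands (a :: rest) = gaCands rest := by
  simp only [gaCands, List.filterMap_cons]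
  simp [PySem.Str.startswith, h1]

-- the step function inside PySem.List.min? with key = fst
def gaStep (acc : Option (Int × String)) (x : Int × String) : Option (Int × String) :=
  match acc with
  | none => some x
  | some m => if x.1 < m.1 then some x else some m

theorem min?_eq_foldl (cs : List (Int × String)) :
    PySem.List.min? cs (fun t => t.1) = cs.foldl gaStep none := by
  unfold PySem.List.min?
  congr 1
  funext acc x
  cases acc <;> rfl

-- a priority-0 accumulator survives any list of 0/1-priority candidates
theorem foldl_key0 (cs : List (Int × String)) (m : Int × String) (hm : m.1 = 0)
    (hk : ∀ c ∈ cs, c.1 = 0 ∨ c.1 = 1) :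
    cs.foldl gaStep (some m) = some m := by
  induction cs with
  | nil => rfl
  | cons c t ih =>
    have hstep : gaStep (some m) c = some m := by
      simp only [gaStep, hm]
      rcases hk c (by simp) with h | h <;> simp [h]
    rw [List.foldl_cons, hstep]
    exact ih (fun c hc => hk c (by simp [hc]))

-- a priority-1 accumulator is replaced by the first priority-0 candidate, if any
theorem foldl_key1 (cs : List (Int × String)) (m : Int × String) (hm : m.1 = 1)
    (hk : ∀ c ∈ cs, c.1 = 0 ∨ c.1 = 1) :
    cs.foldl gaStep (some m) =
      match cs.find? (fun c => c.1 == 0) with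
      | some c => some c
      | none => some m := by
  induction cs with
  | nil => rfl
  | cons c t ih =>
    rcases hk c (by simp) with h | h
    · have hstep : gaStep (some m) c = some c := by simp [gaStep, h, hm]
      rw [List.foldl_cons, hstep,
        foldl_key0 t c h (fun c hc => hk c (by simp [hc]))]
      simp [h]
    · have hstep : gaStep (some m) c = some m := by simp [gaStep, h, hm]
      rw [List.foldl_cons, hstep, ih (fun c hc => hk c (by simp [hc]))]
      have hne : (c.1 == 0) = false := by simp [h]
      simp [hne]

-- A's first loop finds exactly the first priority-0 candidate
theorem gaLoop1_eq_find (args : List String) :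
    gaLoop1 args = ((gaCands args).find? (fun c => c.1 == 0)).map
      (fun t => PySem.Str.replace t.2 "-" "_") := by
  induction args with
  | nil => rfl
  | cons a rest ih =>
    by_cases h2 : PySem.Chars.startswith a.toList ['-', '-'] = true
    · rw [gaCands_cons_ddash rest h2]
      simp [gaLoop1, PySem.Str.startswith, h2]
    · rw [Bool.not_eq_true] at h2
      by_cases h1 : PySem.Chars.startswith a.toList ['-'] = true
      · rw [gaCands_cons_dash rest h2 h1]
        simp only [gaLoop1, PySem.Str.startswith]
        simp [h2, ih]
      · rw [Bool.not_eq_true] at h1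
        rw [gaCands_cons_none rest h1]
        have h2' := h2
        simp only [gaLoop1, PySem.Str.startswith]
        simp [h2, ih]

-- the induction behind the main theorem
theorem ga_eq (args : List String) :
    get_argument_name args = get_argument_name_alt args := by
  unfold get_argument_name get_argument_name_alt
  induction args with
  | nil => rfl
  | cons a rest ih =>
    by_cases h2 : PySem.Chars.startswith a.toList ['-', '-'] = true
    · rw [gaCands_cons_ddash rest h2, min?_eq_foldl, List.foldl_cons]
      have hstep : gaStep none (0, PySem.Str.slice a (some 2) none) =
          some (0, PySem.Str.slice a (some 2) none) := rfl
      rw [hstep, foldl_key0 _ _ rfl (fun c hc => gaCands_keys hc)]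
      simp [gaLoop1, PySem.Str.startswith, h2]
    · rw [Bool.not_eq_true] at h2
      by_cases h1 : PySem.Chars.startswith a.toList ['-'] = true
      · rw [gaCands_cons_dash rest h2 h1, min?_eq_foldl, List.foldl_cons]
        have hstep : gaStep none (1, PySem.Str.slice a (some 1) none) =
            some (1, PySem.Str.slice a (some 1) none) := rfl
        rw [hstep, foldl_key1 _ _ rfl (fun c hc => gaCands_keys hc)]
        rw [gaLoop1_eq_find, gaCands_cons_dash rest h2 h1]
        have hone : (((1 : Int) == 0)) = false := by decide
        simp [gaLoop2, h1, List.find?, hone]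
        cases hf : (gaCands rest).find? (fun c => c.1 == 0) <;> simp
      · rw [Bool.not_eq_true] at h1
        rw [gaCands_cons_none rest h1]
        simp only [gaLoop1, gaLoop2]
        simp [h1, h2]
        exact ih

-- ===== VERDICT =====
theorem get_argument_name_spec : Claim_equal_get_argument_name := by
  intro args _
  exact ga_eq args
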